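-- pv_equiv track=rewrite | github.com/shamilasudalshana/demo_repo | RdfTurle/mapping_prefixes_fuction.py | extract_suffix
-- ===== SOURCE A (Python) =====
-- def extract_suffix(input_string):
--     special_chars = special_chars = [',', '~', '!', '@', '#', '$', '%', '^', '&', '*', '(', ')', '_', '-', '+', '=',
--                                      '{', '[', '}', '}', '|', '\\', ':', ';', '"', "'", '<', ',', '>', '.', '?', '/',
--                                      '1', '2', '3', '4', '5', '6', '7', '8', '9', '0']
--     for char in reversed(input_string):
--         if char in special_chars:
--             return input_string[input_string.rindex(char) + 1:]
--     return input_string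
-- ===== SOURCE B (Python) =====
-- def extract_suffix(input_string):
--     special = set(',~!@#$%^&*()_-+={[}}|\\:;"\'<,>.?/1234567890')
--     last = -1
--     for i, ch in enumerate(input_string):
--         if ch in special:
--             last = i
--     return input_string[last + 1:]
-- ===== Notes on version B (the rewrite author's own statement) =====
-- stated objective: faster
-- what changed: A scans the string right-to-left with an early return and recovers the position with a second rindex pass, testing each character against a 40-element list; B makes one forward pass with enumerate keeping the last special index in an accumulator (set built once), then slices after it, the initial -1 covering the no-special case.
import Mathlib
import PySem

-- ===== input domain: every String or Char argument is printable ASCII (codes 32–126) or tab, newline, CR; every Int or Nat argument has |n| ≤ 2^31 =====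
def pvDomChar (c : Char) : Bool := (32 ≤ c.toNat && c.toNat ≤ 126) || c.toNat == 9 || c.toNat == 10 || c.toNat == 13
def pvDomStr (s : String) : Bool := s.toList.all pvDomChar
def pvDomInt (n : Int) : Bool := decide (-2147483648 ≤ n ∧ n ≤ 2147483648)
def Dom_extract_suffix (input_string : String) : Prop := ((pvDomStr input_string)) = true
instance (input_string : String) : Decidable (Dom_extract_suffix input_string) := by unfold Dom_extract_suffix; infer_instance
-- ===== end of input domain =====

-- B replaces A's reverse scan + early return + rindex recovery pass by one forward
-- pass that accumulates the last special index, then slices once (objective: simpler).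

-- ===== PORT A =====
-- A's special_chars list, duplicates kept as written
def pvSpecialsA : List Char :=
  [',', '~', '!', '@', '#', '$', '%', '^', '&', '*', '(', ')', '_', '-', '+', '=',
   '{', '[', '}', '}', '|', '\\', ':', ';', '"', '\'', '<', ',', '>', '.', '?', '/',
   '1', '2', '3', '4', '5', '6', '7', '8', '9', '0']

-- the 'for char in reversed(input_string)' loop with its early return;
-- Python's rindex(char) is ported as PySem.Str.rfind: here char occurs in the
-- string (it was read from it), and on a present substring rindex = rfind exactly.
def pvALoop (orig : String) : List Char → String
  | [] => orig
  | c :: rest =>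
    if pvSpecialsA.contains c then
      PySem.Str.slice orig (some (PySem.Str.rfind orig (String.singleton c) + 1)) none
    else pvALoop orig rest

def extract_suffix (input_string : String) : String :=
  pvALoop input_string input_string.toList.reverse

-- ===== PORT B =====
-- B's set, built once from the same characters
def pvSpecialSetB : PySem.Set Char :=
  PySem.Set.ofList ",~!@#$%^&*()_-+={[}}|\\:;\"'<,>.?/1234567890".toList

def extract_suffix_alt (input_string : String) : String :=
  let last : Int :=
    (PySem.List.enumerate input_string.toList 0).foldl
      (fun last p => if PySem.Set.contains pvSpecialSetB p.2 then p.1 else last) (-1)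
  PySem.Str.slice input_string (some (last + 1)) none

-- ===== PRECONDITION & SPEC =====
def Spec_extract_suffix (input_string : String) (out : String) : Prop := out = extract_suffix_alt input_string
instance (input_string : String) (out : String) : Decidable (Spec_extract_suffix input_string out) := by unfold Spec_extract_suffix; infer_instance

-- ===== CLAIM (what is proved, stated in full; the proofs are below) =====
def Claim_equal_extract_suffix : Prop := ∀ (input_string : String), Dom_extract_suffix input_string → Spec_extract_suffix input_string (extract_suffix input_string)

-- ===== LEMMAS AND PROOFS =====

-- B's set membership agrees with A's list membership
theorem pv_contains_eq (c : Char) :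
    PySem.Set.contains pvSpecialSetB c = pvSpecialsA.contains c := by
  have h : (",~!@#$%^&*()_-+={[}}|\\:;\"'<,>.?/1234567890" : String).toList = pvSpecialsA := by decide
  rw [Bool.eq_iff_iff]
  simp [pvSpecialSetB, h, PySem.Set.mem_ofList]

-- abbreviation for B's fold step (proof-only)
def pvStep : Int → (Int × Char) → Int :=
  fun last p => if PySem.Set.contains pvSpecialSetB p.2 then p.1 else last

theorem pv_fold_nonspecial (s : List Char) (k acc : Int)
    (h : ∀ x ∈ s, pvSpecialsA.contains x = false) :
    (PySem.List.enumerate s k).foldl pvStep acc = acc := by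
  induction s generalizing k acc with
  | nil => simp [PySem.List.enumerate_nil]
  | cons c s ih =>
    rw [PySem.List.enumerate_cons]
    simp only [List.foldl_cons, pvStep, pv_contains_eq, h c (by simp)]
    exact ih _ _ (fun x hx => h x (by simp [hx]))

theorem pv_fold_last (q t : List Char) (c : Char) (k acc : Int)
    (hc : pvSpecialsA.contains c = true)
    (ht : ∀ x ∈ t, pvSpecialsA.contains x = false) :
    (PySem.List.enumerate (q ++ c :: t) k).foldl pvStep acc = k + q.length := by
  induction q generalizing k acc with
  | nil =>
    rw [List.nil_append, PySem.List.enumerate_cons]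
    simp only [List.foldl_cons, pvStep, pv_contains_eq, hc, if_true]
    rw [pv_fold_nonspecial t _ _ ht]
    simp only [List.length_nil, Nat.cast_zero, add_zero]
  | cons d q ih =>
    rw [List.cons_append, PySem.List.enumerate_cons, List.foldl_cons]
    rw [ih (k + 1) _]
    simp only [List.length_cons]
    push_cast
    ring

-- a singleton prefix of a drop is an indexing fact
theorem pv_prefix_singleton (c : Char) (s : List Char) (i : Nat) :
    [c].isPrefixOf (s.drop i) = true ↔ s[i]? = some c := by
  rw [← List.head?_drop]
  cases h : (s.drop i) with
  | nil => simp [List.isPrefixOf]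
  | cons x xs =>
    simp [List.isPrefixOf_iff_prefix]
    exact eq_comm

theorem pv_rfind_go_down (s : List Char) (c : Char) (pos : Nat) :
    ∀ n, pos ≤ n → (∀ i, pos < i → s[i]? ≠ some c) →
    PySem.Chars.rfind.go s [c] n = PySem.Chars.rfind.go s [c] pos := by
  intro n
  induction n with
  | zero =>
    intro h _
    have hp : pos = 0 := by omega
    rw [hp]
  | succ m ih =>
    intro hle hno
    rcases Nat.eq_or_lt_of_le hle with h | h
    · rw [h]
    · have step : PySem.Chars.rfind.go s [c] (m + 1)
          = if [c].isPrefixOf (s.drop (m + 1)) then ((m + 1 : Nat) : Int)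
            else PySem.Chars.rfind.go s [c] m := rfl
      rw [step, if_neg, ih (by omega) hno]
      intro hp
      exact hno (m + 1) (by omega) ((pv_prefix_singleton c s (m + 1)).mp hp)

theorem pv_rfind_at (s : List Char) (c : Char) (pos : Nat) (h : s[pos]? = some c) :
    PySem.Chars.rfind.go s [c] pos = pos := by
  cases pos with
  | zero =>
    have h0 : [c].isPrefixOf (s.drop 0) = true := (pv_prefix_singleton c s 0).mpr h
    have step : PySem.Chars.rfind.go s [c] 0
        = if [c].isPrefixOf (s.drop 0) then (0 : Int) else -1 := rfl
    rw [step, if_pos h0]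
    rfl
  | succ m =>
    have h0 : [c].isPrefixOf (s.drop (m + 1)) = true := (pv_prefix_singleton c s (m + 1)).mpr h
    have step : PySem.Chars.rfind.go s [c] (m + 1)
        = if [c].isPrefixOf (s.drop (m + 1)) then ((m + 1 : Nat) : Int)
          else PySem.Chars.rfind.go s [c] m := rfl
    rw [step, if_pos h0]

theorem pv_rfind_last (q t : List Char) (c : Char)
    (hc : pvSpecialsA.contains c = true)
    (ht : ∀ x ∈ t, pvSpecialsA.contains x = false) :
    PySem.Chars.rfind (q ++ c :: t) [c] = (q.length : Int) := by
  have hno : ∀ i, q.length < i → (q ++ c :: t)[i]? ≠ some c := by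
    intro i hi hsome
    have hr : (q ++ c :: t)[i]? = (c :: t)[i - q.length]? :=
      List.getElem?_append_right (by omega)
    rw [hr] at hsome
    rcases Nat.exists_eq_add_of_lt hi with ⟨j, hj⟩
    have hji : i - q.length = j + 1 := by omega
    rw [hji] at hsome
    simp only [List.getElem?_cons_succ] at hsome
    have hmem : c ∈ t := List.mem_of_getElem? hsome
    have htc := ht c hmem
    rw [hc] at htc
    exact Bool.true_eq_false.mp htc
  have hat : (q ++ c :: t)[q.length]? = some c := by
    rw [List.getElem?_append_right (Nat.le_refl _)]
    simp
  have hrf : PySem.Chars.rfind (q ++ c :: t) [c]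
      = PySem.Chars.rfind.go (q ++ c :: t) [c] (q ++ c :: t).length := rfl
  rw [hrf, pv_rfind_go_down _ c q.length _ (by simp) hno, pv_rfind_at _ c q.length hat]

theorem pv_main (r t : List Char) (orig : String)
    (horig : orig.toList = r.reverse ++ t)
    (ht : ∀ x ∈ t, pvSpecialsA.contains x = false) :
    pvALoop orig r
      = PySem.Str.slice orig
          (some ((PySem.List.enumerate orig.toList 0).foldl pvStep (-1) + 1)) none := by
  induction r generalizing t with
  | nil =>
    rw [pvALoop, horig, List.reverse_nil, List.nil_append,
        pv_fold_nonspecial t 0 (-1) ht]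
    norm_num
    simp [PySem.Str.slice]
  | cons c r ih =>
    rw [pvALoop]
    have horig' : orig.toList = r.reverse ++ (c :: t) := by
      rw [horig]; simp
    cases hc : pvSpecialsA.contains c with
    | false =>
      rw [if_neg (by simp)]
      exact ih (c :: t) horig' (by
        intro x hx
        rcases List.mem_cons.mp hx with rfl | hx
        · exact hc
        · exact ht x hx)
    | true =>
      rw [if_pos rfl]
      rw [horig', pv_fold_last r.reverse t c 0 (-1) hc ht]
      have : PySem.Str.rfind orig (String.singleton c) = (r.reverse.length : Int) := by
        rw [PySem.Str.rfind_eq]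
        have : (String.singleton c).toList = [c] := by simp
        rw [this, horig', pv_rfind_last r.reverse t c hc ht]
      rw [this]
      norm_num

-- ===== VERDICT (by name: the statement is the Claim_ definition above) =====
theorem extract_suffix_spec : Claim_equal_extract_suffix := by
  intro s _
  unfold Spec_extract_suffix extract_suffix extract_suffix_alt
  have := pv_main s.toList.reverse [] s (by simp) (by simp)
  rw [this]
  rfl
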